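-- pv_equiv track=rewrite | github.com/GorleJansi/cPaas-sNow-summarisation-agent | app.py | _parse_summary_sections
-- ===== SOURCE A (Python) =====
-- def _parse_summary_sections(summary_text: str) -> list:
--     """
--     Split an LLM summary into (header, body) pairs.
--     Recognises lines like  "Problem:"  or  "What Was Done:"  as section headers.
--     The first chunk before any recognised header is the metadata line.
--     """
--     section_headers = {
--         "Problem:", "Root Cause:", "What Was Done:",
--         "Current Status:", "Next Steps:", "Overview:",
--         "Actions Taken:", "Key Points:",
--     }
--     sections: list = []
--     current_header = ""
--     current_lines: list = []
--
--     for line in summary_text.splitlines():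
--         stripped = line.strip()
--         if stripped in section_headers:
--             # Flush previous section
--             if current_header or current_lines:
--                 sections.append((current_header, "\n".join(current_lines).strip()))
--             current_header = stripped
--             current_lines = []
--         else:
--             current_lines.append(line)
--
--     # Flush last section
--     if current_header or current_lines:
--         sections.append((current_header, "\n".join(current_lines).strip()))
--
--     return sections
-- ===== SOURCE B (Python) =====
-- _HEADERS = {
--     "Problem:", "Root Cause:", "What Was Done:",
--     "Current Status:", "Next Steps:", "Overview:",
--     "Actions Taken:", "Key Points:",
-- }
--
--
-- def _parse_summary_sections(summary_text: str) -> list: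
--     """Split at the first recognised header line and recurse on the tail."""
--     return _sections("", summary_text.splitlines())
--
--
-- def _sections(header, lines):
--     for i, line in enumerate(lines):
--         if line.strip() in _HEADERS:
--             head = (
--                 [(header, "\n".join(lines[:i]).strip())]
--                 if header or i > 0 else []
--             )
--             return head + _sections(line.strip(), lines[i + 1:])
--     if header or lines:
--         return [(header, "\n".join(lines).strip())]
--     return []
-- ===== Notes on version B (the rewrite author's own statement) =====
-- stated objective: alternative
-- what changed: Replaced A's single accumulator fold (sections/current_header/current_lines state with flush-on-header) by a recursive decomposition that splits the line list at the first recognised header, emits that chunk, and recurses on the tail with no mutable state.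
import Mathlib
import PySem

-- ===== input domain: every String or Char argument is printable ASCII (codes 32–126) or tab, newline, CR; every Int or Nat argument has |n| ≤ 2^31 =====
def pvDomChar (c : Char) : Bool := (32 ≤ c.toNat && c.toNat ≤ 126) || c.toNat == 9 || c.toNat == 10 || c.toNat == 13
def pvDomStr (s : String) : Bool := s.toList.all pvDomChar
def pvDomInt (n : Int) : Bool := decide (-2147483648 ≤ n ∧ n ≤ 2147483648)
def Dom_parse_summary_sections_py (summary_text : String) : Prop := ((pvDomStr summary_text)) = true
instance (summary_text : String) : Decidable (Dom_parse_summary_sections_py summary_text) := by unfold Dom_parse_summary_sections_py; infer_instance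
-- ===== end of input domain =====

-- B replaces A's accumulator fold by a recursive split at the first header line; objective: alternative decomposition (same cost).

-- ===== PORT A =====
-- the section_headers set (membership test only)
def pvHeaders : List String :=
  ["Problem:", "Root Cause:", "What Was Done:",
   "Current Status:", "Next Steps:", "Overview:",
   "Actions Taken:", "Key Points:"]

-- 'if current_header or current_lines: sections.append((current_header, "\n".join(current_lines).strip()))'
def pvFlushA (hdr : String) (cur : List String) : List (String × String) :=
  if hdr ≠ "" ∨ cur ≠ [] then [(hdr, PySem.Str.strip (PySem.Str.join "\n" cur))] else []

-- one iteration of A's for-loop over (sections, current_header, current_lines)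
def pvStepA (st : List (String × String) × String × List String) (line : String) :
    List (String × String) × String × List String :=
  let stripped := PySem.Str.strip line
  if pvHeaders.contains stripped then
    (st.1 ++ pvFlushA st.2.1 st.2.2, stripped, [])
  else
    (st.1, st.2.1, st.2.2 ++ [line])

def parse_summary_sections_py (summary_text : String) : List (String × String) :=
  let st := (PySem.Str.splitlines summary_text).foldl pvStepA ([], "", [])
  st.1 ++ pvFlushA st.2.1 st.2.2

-- ===== PORT B =====
-- index of the first line whose strip is a recognised header (Source B's enumerate loop)
def pvFindHdr : List String → Option Nat
  | [] => none
  | l :: ls =>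
      if pvHeaders.contains (PySem.Str.strip l) then some 0
      else (pvFindHdr ls).map (· + 1)

theorem pvFindHdr_lt (ls : List String) (i : Nat) (h : pvFindHdr ls = some i) : i < ls.length := by
  induction ls generalizing i with
  | nil => simp [pvFindHdr] at h
  | cons l t ih =>
      simp only [pvFindHdr] at h
      split at h
      · simp only [Option.some.injEq] at h
        subst h; simp
      · simp only [Option.map_eq_some_iff] at h
        obtain ⟨j, hj, rfl⟩ := h
        have := ih j hj
        simp; omega

-- Source B's _sections: split at the first header, emit the leading chunk, recurse on the tail
def pvSections (header : String) (lines : List String) : List (String × String) :=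
  match h : pvFindHdr lines with
  | some i =>
      (if header ≠ "" ∨ 0 < i then
        [(header, PySem.Str.strip (PySem.Str.join "\n" (lines.take i)))]
       else []) ++
      pvSections (PySem.Str.strip (lines.getD i "")) (lines.drop (i + 1))
  | none =>
      if header ≠ "" ∨ lines ≠ [] then
        [(header, PySem.Str.strip (PySem.Str.join "\n" lines))]
      else []
termination_by lines.length
decreasing_by
  have := pvFindHdr_lt lines i h
  simp [List.length_drop]; omega

def parse_summary_sections_py_alt (summary_text : String) : List (String × String) :=
  pvSections "" (PySem.Str.splitlines summary_text)

-- ===== PRECONDITION & SPEC =====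
def Spec_parse_summary_sections_py (summary_text : String) (out : List (String × String)) : Prop := out = parse_summary_sections_py_alt summary_text
instance (summary_text : String) (out : List (String × String)) : Decidable (Spec_parse_summary_sections_py summary_text out) := by unfold Spec_parse_summary_sections_py; infer_instance

-- ===== CLAIM (what is proved, stated in full; the proofs are below) =====
def Claim_equal_parse_summary_sections_py : Prop := ∀ (summary_text : String), Dom_parse_summary_sections_py summary_text → Spec_parse_summary_sections_py summary_text (parse_summary_sections_py summary_text)

-- ===== LEMMAS AND PROOFS =====

-- ghost: B's recursion generalised by the pending (header, cur) state of A's loop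
def pvGhost (header : String) (cur : List String) (lines : List String) : List (String × String) :=
  match pvFindHdr lines with
  | some i =>
      (if header ≠ "" ∨ cur ≠ [] ∨ 0 < i then
        [(header, PySem.Str.strip (PySem.Str.join "\n" (cur ++ lines.take i)))]
       else []) ++
      pvSections (PySem.Str.strip (lines.getD i "")) (lines.drop (i + 1))
  | none =>
      if header ≠ "" ∨ cur ≠ [] ∨ lines ≠ [] then
        [(header, PySem.Str.strip (PySem.Str.join "\n" (cur ++ lines)))]
      else []

theorem pvGhost_nil_cur (header : String) (lines : List String) :
    pvGhost header [] lines = pvSections header lines := by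
  rw [pvSections, pvGhost]
  cases h : pvFindHdr lines <;> simp

theorem pvGhost_shift (header : String) (cur : List String) (l : String) (ls : List String)
    (hl : pvHeaders.contains (PySem.Str.strip l) = false) :
    pvGhost header cur (l :: ls) = pvGhost header (cur ++ [l]) ls := by
  unfold pvGhost
  have hm : PySem.Str.strip l ∉ pvHeaders := by simpa using hl
  have hfind : pvFindHdr (l :: ls) = (pvFindHdr ls).map (· + 1) := by
    simp [pvFindHdr, hm]
  rw [hfind]
  cases h : pvFindHdr ls with
  | none => simp
  | some i =>
      simp only [Option.map_some]
      have h1 : (l :: ls).take (i + 1) = l :: ls.take i := rfl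
      have h2 : (l :: ls).getD (i + 1) "" = ls.getD i "" := rfl
      have h3 : (l :: ls).drop (i + 1 + 1) = ls.drop (i + 1) := rfl
      rw [h1, h2, h3]
      simp

theorem pvMain (lines : List String) :
    ∀ (secs : List (String × String)) (header : String) (cur : List String),
    (let st := lines.foldl pvStepA (secs, header, cur)
     st.1 ++ pvFlushA st.2.1 st.2.2) = secs ++ pvGhost header cur lines := by
  induction lines with
  | nil =>
      intro secs header cur
      simp only [List.foldl_nil, pvGhost, pvFindHdr, pvFlushA]
      by_cases h : header ≠ "" ∨ cur ≠ [] <;> simp [h]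
  | cons l ls ih =>
      intro secs header cur
      simp only [List.foldl_cons]
      by_cases hl : pvHeaders.contains (PySem.Str.strip l) = true
      · -- header line: flush and restart
        have hm : PySem.Str.strip l ∈ pvHeaders := by simpa using hl
        have hstep : pvStepA (secs, header, cur) l
            = (secs ++ pvFlushA header cur, PySem.Str.strip l, []) := by
          simp [pvStepA, hm]
        rw [hstep, ih]
        have hfind : pvFindHdr (l :: ls) = some 0 := by simp [pvFindHdr, hm]
        rw [pvGhost_nil_cur]
        unfold pvGhost
        rw [hfind]
        simp [pvFlushA, List.append_assoc]
      · have hl' : pvHeaders.contains (PySem.Str.strip l) = false := by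
          simpa using hl
        have hm : PySem.Str.strip l ∉ pvHeaders := by simpa using hl'
        have hstep : pvStepA (secs, header, cur) l = (secs, header, cur ++ [l]) := by
          simp [pvStepA, hm]
        rw [hstep, ih, pvGhost_shift header cur l ls hl']

-- ===== VERDICT (by name: the statement is the Claim_ definition above) =====
theorem parse_summary_sections_py_spec : Claim_equal_parse_summary_sections_py := by
  intro summary_text _
  unfold Spec_parse_summary_sections_py parse_summary_sections_py parse_summary_sections_py_alt
  rw [pvMain (PySem.Str.splitlines summary_text) [] "" []]
  simp [pvGhost_nil_cur]
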